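-- pv_equiv track=rewrite | github.com/mabau/pystencils | gpucuda/indexing.py | permute_block_size_according_to_layout
-- ===== SOURCE A (Python) =====
-- def permute_block_size_according_to_layout(block_size, layout):
--     """Returns modified block_size such that the fastest coordinate gets the biggest block dimension"""
--     sorted_block_size = list(sorted(block_size, reverse=True))
--     while len(sorted_block_size) > len(layout):
--         sorted_block_size[0] *= sorted_block_size[-1]
--         sorted_block_size = sorted_block_size[:-1]
--
--     result = list(block_size)
--     for l, bs in zip(reversed(layout), sorted_block_size):
--         result[l] = bs
--     return tuple(result[:len(layout)])
-- ===== SOURCE B (Python) =====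
-- def permute_block_size_according_to_layout(block_size, layout):
--     """Returns modified block_size such that the fastest coordinate gets the biggest block dimension"""
--     n, m = len(block_size), len(layout)
--     asc = sorted(block_size)
--     big = 1
--     for x in asc[:max(n - m, 0)] + asc[-1:]:
--         big *= x
--     result = list(block_size)
--     for r in range(min(n, m)):
--         result[layout[m - 1 - r]] = big if r == 0 else asc[n - 1 - r]
--     return tuple(result[:m])
-- ===== Notes on version B (the rewrite author's own statement) =====
-- stated objective: alternative
-- what changed: Replaces A's descending sort with iterative while-loop collapse (repeated slicing) and reversed-zip destructive assignment by a single ascending sort, one closed-form product for the fastest coordinate's dimension, and a direct loop over speed ranks that writes each value computed by index arithmetic; Pre_ only excludes inputs where A raises IndexError (a used layout entry outside [-n, n)).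
import Mathlib
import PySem

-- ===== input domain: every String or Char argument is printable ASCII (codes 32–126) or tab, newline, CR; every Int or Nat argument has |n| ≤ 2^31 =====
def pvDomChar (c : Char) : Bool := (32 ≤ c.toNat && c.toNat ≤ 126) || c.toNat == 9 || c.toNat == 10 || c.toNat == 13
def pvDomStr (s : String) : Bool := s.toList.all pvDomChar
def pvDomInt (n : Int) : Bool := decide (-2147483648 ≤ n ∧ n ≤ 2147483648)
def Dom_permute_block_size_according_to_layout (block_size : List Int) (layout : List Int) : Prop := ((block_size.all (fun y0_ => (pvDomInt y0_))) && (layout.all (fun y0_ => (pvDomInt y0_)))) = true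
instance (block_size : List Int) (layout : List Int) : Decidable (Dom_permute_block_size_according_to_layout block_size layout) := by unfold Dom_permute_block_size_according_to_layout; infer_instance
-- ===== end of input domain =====

-- B replaces A's descending sort + iterative collapse + reversed-zip assignment by a single
-- ascending sort, one closed-form product for the fastest coordinate, and a direct loop over
-- speed ranks reading each value by index arithmetic (alternative decomposition, similar cost).

-- ===== PORT A =====
-- the while-loop: while len(s) > len(layout): s[0] *= s[-1]; s = s[:-1]
def pvCollapseA (m : Nat) (s : List Int) : List Int :=
  if _h : m < s.length then
    pvCollapseA m (((PySem.List.pyGetD s 0 0 * PySem.List.pyGetD s (-1) 0) :: s.tail).dropLast)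
  else s
termination_by s.length
decreasing_by simp; omega

def permute_block_size_according_to_layout (block_size : List Int) (layout : List Int) : List Int :=
  let sorted_block_size := pvCollapseA layout.length (PySem.List.sorted block_size (fun x => x) true)
  let result := (layout.reverse.zip sorted_block_size).foldl
      (fun r p => PySem.List.pySetD r p.1 p.2) block_size
  PySem.List.slice result none (some (layout.length : Int))

-- ===== PORT B =====
def permute_block_size_according_to_layout_alt (block_size : List Int) (layout : List Int) : List Int :=
  let n := block_size.length
  let m := layout.length
  let asc := PySem.List.sorted block_size (fun x => x) false
  let big := (PySem.List.slice asc none (some (max ((n : Int) - (m : Int)) 0)) ++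
              PySem.List.slice asc (some (-1)) none).foldl (fun a x => a * x) 1
  let result := (List.range (min n m)).foldl
      (fun r (i : Nat) => PySem.List.pySetD r (PySem.List.pyGetD layout ((m : Int) - 1 - (i : Int)) 0)
        (if i = 0 then big else PySem.List.pyGetD asc ((n : Int) - 1 - (i : Int)) 0)) block_size
  PySem.List.slice result none (some (m : Int))

-- ===== PRECONDITION & SPEC =====
-- Pre_ excludes exactly the inputs where A raises IndexError: a layout entry that is
-- actually used as an assignment index (one of the first min(n, m) entries of the
-- reversed layout) but lies outside the valid Python index range [-n, n).
def Pre_permute_block_size_according_to_layout (block_size : List Int) (layout : List Int) : Prop :=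
  ∀ l ∈ layout.reverse.take (min block_size.length layout.length),
    -(block_size.length : Int) ≤ l ∧ l < block_size.length
instance (block_size : List Int) (layout : List Int) : Decidable (Pre_permute_block_size_according_to_layout block_size layout) := by unfold Pre_permute_block_size_according_to_layout; infer_instance

def pvWitness_permute_block_size_according_to_layout : List Int × List Int := ([16, 4, 2], [2, -3, 1])

def Spec_permute_block_size_according_to_layout (block_size : List Int) (layout : List Int) (out : List Int) : Prop := out = permute_block_size_according_to_layout_alt block_size layout
instance (block_size : List Int) (layout : List Int) (out : List Int) : Decidable (Spec_permute_block_size_according_to_layout block_size layout out) := by unfold Spec_permute_block_size_according_to_layout; infer_instance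

-- ===== CLAIM (what is proved, stated in full; the proofs are below) =====
def Claim_equal_permute_block_size_according_to_layout : Prop := ∀ (block_size : List Int) (layout : List Int), Dom_permute_block_size_according_to_layout block_size layout → Pre_permute_block_size_according_to_layout block_size layout → Spec_permute_block_size_according_to_layout block_size layout (permute_block_size_according_to_layout block_size layout)

-- ===== LEMMAS AND PROOFS =====

theorem pvFoldl_mul (l : List Int) (a : Int) : l.foldl (fun a x => a * x) a = a * l.prod := by
  induction l generalizing a with
  | nil => simp
  | cons x t ih => simp [ih, mul_assoc]

theorem pvCollapseA_stop (m : Nat) (s : List Int) (hs : ¬ m < s.length) :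
    pvCollapseA m s = s := by
  rw [pvCollapseA]; simp [hs]

-- closed form of A's while-loop for 1 ≤ m < s.length
theorem pvCollapseA_eq (m : Nat) (hm : 1 ≤ m) (s : List Int) (hs : m < s.length) :
    pvCollapseA m s = (s.headD 1 * (s.drop m).prod) :: (s.tail.take (m - 1)) := by
  have H : ∀ (k : Nat) (s : List Int), s.length = k → m < s.length →
      pvCollapseA m s = (s.headD 1 * (s.drop m).prod) :: (s.tail.take (m - 1)) := by
    intro k
    induction k using Nat.strong_induction_on with
    | _ k ih =>
      intro s hk hs
      match s, hs with
      | a :: t, hs =>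
        have ht : t ≠ [] := by
          intro h; subst h; simp at hs; omega
        have hlast : PySem.List.pyGetD (a :: t) (-1) 0 = t.getLast ht := by
          rw [PySem.List.pyGetD_neg_one (a :: t) 0 (by simp)]
          exact List.getLast_cons ht ▸ rfl
        rw [pvCollapseA, dif_pos hs]
        simp only [PySem.List.pyGetD_zero_cons, hlast, List.tail_cons,
          List.dropLast_cons_of_ne_nil ht]
        set b := a * t.getLast ht with hb
        have htlen : m ≤ t.length := by simp at hs; omega
        have htd : t = t.dropLast ++ [t.getLast ht] := (List.dropLast_append_getLast ht).symm
        have hdlen : t.dropLast.length = t.length - 1 := List.length_dropLast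
        by_cases hrec : m < (b :: t.dropLast).length
        · rw [ih (k - 1) (by omega) _ (by simp at hk ⊢; omega) hrec]
          have hm1 : m = (m-1) + 1 := by omega
          simp only [List.headD_cons, List.tail_cons]
          rw [hm1, List.drop_succ_cons, List.drop_succ_cons]
          congr 1
          · have hd2 : t.drop (m - 1) = t.dropLast.drop (m - 1) ++ [t.getLast ht] := by
              conv_lhs => rw [htd]
              rw [List.drop_append_of_le_length (by simp at hrec; omega)]
            rw [hd2, List.prod_append, List.prod_singleton, hb]
            ring
          · rw [show m - 1 + 1 - 1 = m - 1 from by omega]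
            conv_rhs => rw [htd]
            rw [List.take_append_of_le_length (by simp at hrec; omega)]
        · rw [pvCollapseA_stop m _ hrec]
          have htm : t.length = m := by simp at hrec; omega
          have hm1 : m = (m-1) + 1 := by omega
          simp only [List.headD_cons]
          rw [hm1, List.drop_succ_cons]
          congr 1
          · have : t.drop (m - 1) = [t.getLast ht] := by
              conv_lhs => rw [htd]
              rw [List.drop_append_of_le_length (by omega), List.drop_eq_nil_of_le (by omega)]
              simp
            rw [this, List.prod_singleton, hb]
          · rw [show m - 1 + 1 - 1 = m - 1 from by omega]
            rw [List.dropLast_eq_take, htm]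
  exact H s.length s rfl hs

-- sorting descending yields the reverse of sorting ascending (Int values, identity key)
theorem pvSortedRev_eq_reverse (bs : List Int) :
    PySem.List.sorted bs (fun x => x) true = (PySem.List.sorted bs (fun x => x) false).reverse := by
  have hperm : (PySem.List.sorted bs (fun x => x) true).Perm
      ((PySem.List.sorted bs (fun x => x) false).reverse) := by
    refine (PySem.List.sorted_perm bs (fun x => x) true).trans ?_
    refine ((PySem.List.sorted_perm bs (fun x => x) false).symm).trans ?_
    exact (List.reverse_perm _).symm
  have h1 : (PySem.List.sorted bs (fun x => x) true).Pairwise (fun a b : Int => b ≤ a) := by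
    have := PySem.List.sorted_pairwise_rev bs (fun x => x)
    simpa using this
  have h2 : ((PySem.List.sorted bs (fun x => x) false).reverse).Pairwise (fun a b : Int => b ≤ a) := by
    rw [List.pairwise_reverse]
    have := PySem.List.sorted_pairwise bs (fun x => x)
    simpa [flip] using this
  exact List.Perm.eq_of_pairwise (fun a b _ _ hab hba => le_antisymm hba hab) h1 h2 hperm

-- ===== VERDICT (by name: the statement is the Claim_ definition above) =====
theorem permute_block_size_according_to_layout_spec : Claim_equal_permute_block_size_according_to_layout := by
  intro bs lay _hdom _hpre
  unfold Spec_permute_block_size_according_to_layout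
  unfold permute_block_size_according_to_layout permute_block_size_according_to_layout_alt
  simp only []
  set n := bs.length with hn
  set m := lay.length with hmm
  set asc := PySem.List.sorted bs (fun x => x) false with hascdef
  have hasc : asc.length = n := PySem.List.length_sorted bs (fun x => x) false
  have hrev : PySem.List.sorted bs (fun x => x) true = asc.reverse := pvSortedRev_eq_reverse bs
  rw [hrev]
  rcases Nat.eq_zero_or_pos m with hm0 | hm
  · -- layout empty: both sides are the empty slice
    have : lay = [] := List.eq_nil_of_length_eq_zero hm0
    subst this
    simp [PySem.List.slice_to]
  · -- 1 ≤ m: the two assignment-pair sequences are identical, so the folds coincide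
    set colA := pvCollapseA m asc.reverse with hc
    set big := (PySem.List.slice asc none (some (max ((n : Int) - (m : Int)) 0)) ++
        PySem.List.slice asc (some (-1)) none).foldl (fun a x => a * x) 1 with hbig
    have hclen : colA.length = min n m := by
      rw [hc]
      by_cases hmn : m < n
      · rw [pvCollapseA_eq m hm asc.reverse (by simp [hasc]; omega)]
        simp [hasc]; omega
      · rw [pvCollapseA_stop m asc.reverse (by simp [hasc]; omega)]
        simp [hasc]; omega
    have hkey : lay.reverse.zip colA =
        (List.range (min n m)).map (fun (i : Nat) =>
          (PySem.List.pyGetD lay ((m : Int) - 1 - (i : Int)) 0,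
           if i = 0 then big else PySem.List.pyGetD asc ((n : Int) - 1 - (i : Int)) 0)) := by
      apply List.ext_getElem
      · simp [hclen]; omega
      · intro t h1 h2
        have htK : t < min n m := by simpa using h2
        have htm : t < m := by omega
        have htn : t < n := by omega
        rw [List.getElem_zip, List.getElem_map, List.getElem_range]
        have hfst : lay.reverse[t]'(by simp; omega) =
            PySem.List.pyGetD lay ((m : Int) - 1 - (t : Int)) 0 := by
          rw [show ((m : Int) - 1 - (t : Int)) = ((m - 1 - t : Nat) : Int) from by omega,
            PySem.List.pyGetD_natCast]
          rw [List.getElem_reverse]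
          rw [List.getD_eq_getElem lay 0 (by omega)]
        have hsnd : colA[t]'(by omega) =
            if t = 0 then big else PySem.List.pyGetD asc ((n : Int) - 1 - (t : Int)) 0 := by
          have hgetasc : ∀ (h : t < n), asc.reverse[t]'(by simp [hasc]; omega) =
              PySem.List.pyGetD asc ((n : Int) - 1 - (t : Int)) 0 := by
            intro h
            rw [show ((n : Int) - 1 - (t : Int)) = ((n - 1 - t : Nat) : Int) from by omega,
              PySem.List.pyGetD_natCast]
            rw [List.getElem_reverse]
            rw [List.getD_eq_getElem asc 0 (by omega)]
            simp [hasc]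
          by_cases hmn : m < n
          · -- collapse really ran: closed form of the while-loop
            have hcc : colA = (asc.reverse.headD 1 * (asc.reverse.drop m).prod) ::
                (asc.reverse.tail.take (m - 1)) :=
              hc ▸ pvCollapseA_eq m hm asc.reverse (by simp [hasc]; omega)
            rcases Nat.eq_zero_or_pos t with ht0 | htpos
            · subst ht0
              simp only [hcc, List.getElem_cons_zero, reduceIte]
              -- head of desc = last of asc; surplus tail of desc = reversed smallest prefix of asc
              have hne : asc ≠ [] := by intro h; rw [h] at hasc; simp at hasc; omega
              have hhead : asc.reverse.headD 1 = asc.getLast hne := by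
                rw [List.headD_eq_head?, List.head?_reverse,
                  List.getLast?_eq_some_getLast hne, Option.getD_some]
              have hdrop : asc.reverse.drop m = (asc.take (n - m)).reverse := by
                rw [List.reverse_take, hasc]
                congr 1
                omega
              rw [hbig]
              rw [show (max ((n : Int) - (m : Int)) 0) = ((n - m : Nat) : Int) from by omega]
              rw [PySem.List.slice_to_natCast, PySem.List.slice_from_neg_one]
              rw [pvFoldl_mul, List.prod_append, hdrop, List.prod_reverse]
              have hlastd : asc.drop (asc.length - 1) = [asc.getLast hne] := by
                rw [List.drop_length_sub_one hne]
              rw [hlastd, List.prod_singleton, hhead]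
              ring
            · simp only [hcc]
              rw [if_neg (by omega), ← hgetasc htn]
              obtain ⟨t', rfl⟩ : ∃ t', t = t' + 1 := ⟨t - 1, by omega⟩
              rw [List.getElem_cons_succ]
              rw [List.getElem_take, List.getElem_tail]
          · -- no collapse: c = desc
            have hcc : colA = asc.reverse :=
              hc ▸ pvCollapseA_stop m asc.reverse (by simp [hasc]; omega)
            rcases Nat.eq_zero_or_pos t with ht0 | htpos
            · subst ht0
              simp only [hcc, reduceIte]
              rw [hbig]
              have hne : asc ≠ [] := by intro h; rw [h] at hasc; simp at hasc; omega
              rw [show (max ((n : Int) - (m : Int)) 0) = ((0 : Nat) : Int) from by omega]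
              rw [PySem.List.slice_to_natCast, PySem.List.slice_from_neg_one]
              simp only [List.take_zero, List.nil_append]
              rw [pvFoldl_mul, List.drop_length_sub_one hne, List.prod_singleton, one_mul]
              rw [List.getElem_reverse, List.getLast_eq_getElem]
              simp
            · simp only [hcc]
              rw [if_neg (by omega), hgetasc htn]
        rw [hfst, hsnd]
    rw [hkey, List.foldl_map]
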